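-- pv_equiv track=rewrite | github.com/Amirtaha-Danayi/question_175884_Quera | calculator.py | calculate_floor
-- ===== SOURCE A (Python) =====
-- def calculate_floor(string):
--     floor = 0
--     list = []
--     for i in string:
--         list.append(i)
--
--     for x in list:
--         if x == 'U':
--             floor+=1
--         else:
--             floor-=1
--     return(floor)
-- ===== SOURCE B (Python) =====
-- def calculate_floor(string):
--     # Closed form: floor = (#'U') - (#others) = 2*count('U') - len
--     return 2 * string.count('U') - len(string)
-- ===== Notes on version B (the rewrite author's own statement) =====
-- stated objective: simpler
-- what changed: Replaced the copy-to-list loop and the branching accumulation loop with the closed form 2*string.count('U') - len(string).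
import Mathlib
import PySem

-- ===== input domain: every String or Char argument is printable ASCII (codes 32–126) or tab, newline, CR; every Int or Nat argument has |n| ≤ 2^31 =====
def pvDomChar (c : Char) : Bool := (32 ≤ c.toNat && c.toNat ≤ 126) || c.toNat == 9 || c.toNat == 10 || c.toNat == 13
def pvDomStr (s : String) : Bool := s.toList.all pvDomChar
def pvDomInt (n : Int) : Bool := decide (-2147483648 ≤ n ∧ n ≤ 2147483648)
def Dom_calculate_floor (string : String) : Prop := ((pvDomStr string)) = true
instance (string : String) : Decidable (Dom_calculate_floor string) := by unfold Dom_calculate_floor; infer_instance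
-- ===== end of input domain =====

-- B replaces A's two loops by the closed form 2*count('U') - len (simpler).
-- ===== PORT A =====
def calculate_floor (string : String) : Int :=
  -- list = []; for i in string: list.append(i)
  let list : List Char := string.toList.foldl (fun l i => l ++ [i]) []
  -- floor = 0; for x in list: if x == 'U': floor += 1 else: floor -= 1
  list.foldl (fun floor x => if x == 'U' then floor + 1 else floor - 1) (0 : Int)

-- ===== PORT B =====
def calculate_floor_alt (string : String) : Int :=
  2 * (PySem.Str.count string "U" : Int) - (PySem.Str.len string : Int)

-- ===== PRECONDITION & SPEC =====
def Spec_calculate_floor (string : String) (out : Int) : Prop := out = calculate_floor_alt string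
instance (string : String) (out : Int) : Decidable (Spec_calculate_floor string out) := by unfold Spec_calculate_floor; infer_instance

-- ===== CLAIM (what is proved, stated in full; the proofs are below) =====
def Claim_equal_calculate_floor : Prop := ∀ (string : String), Dom_calculate_floor string → Spec_calculate_floor string (calculate_floor string)

-- ===== LEMMAS AND PROOFS =====

-- A's first loop just copies the string into a list.
theorem pv_copy_loop (l : List Char) (acc : List Char) :
    l.foldl (fun l i => l ++ [i]) acc = acc ++ l := by
  induction l generalizing acc with
  | nil => simp
  | cons h t ih => simp [List.foldl, ih]

-- A's second loop computes acc + 2*count('U') - len.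
theorem pv_floor_loop (l : List Char) (acc : Int) :
    l.foldl (fun floor x => if x == 'U' then floor + 1 else floor - 1) acc
      = acc + 2 * (l.count 'U' : Int) - (l.length : Int) := by
  induction l generalizing acc with
  | nil => simp
  | cons h t ih =>
    rw [List.foldl_cons, ih]
    split_ifs with hc <;> simp [List.count_cons, hc] <;> ring

-- Python str.count with a single-character needle counts occurrences of that char.
theorem pv_count_go_singleton (c : Char) (l : List Char) (fuel : Nat) (acc : Nat)
    (h : l.length ≤ fuel) :
    PySem.Chars.count.go [c] fuel l acc = acc + l.count c := by
  induction l generalizing fuel acc with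
  | nil => cases fuel <;> simp [PySem.Chars.count.go]
  | cons hd t ih =>
    cases fuel with
    | zero => simp at h
    | succ n =>
      by_cases hc : hd = c
      · simp [PySem.Chars.count.go, hc, List.isPrefixOf,
          ih _ _ (by simpa using h)]
        omega
      · have hpre : List.isPrefixOf [c] (hd :: t) = false := by
          simp [List.isPrefixOf]
          exact fun habs => (hc habs.symm).elim
        simp [PySem.Chars.count.go, hpre, hc,
          ih _ _ (by simpa using Nat.le_of_succ_le_succ h)]

theorem pv_count_singleton (c : Char) (l : List Char) :
    PySem.Chars.count l [c] = l.count c := by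
  simp [PySem.Chars.count, pv_count_go_singleton c l l.length 0 le_rfl]

-- ===== VERDICT (by name: the statement is the Claim_ definition above) =====
theorem calculate_floor_spec : Claim_equal_calculate_floor := by
  intro s _
  unfold Spec_calculate_floor calculate_floor calculate_floor_alt
  rw [pv_copy_loop, List.nil_append, pv_floor_loop]
  simp [PySem.Str.count, PySem.Str.len, pv_count_singleton]
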